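-- pv_equiv track=rewrite | github.com/daniel-reich/turbo-robot | Y4gwcGfcGb3SKz6Tu_5.py | max_separator
-- ===== SOURCE A (Python) =====
-- def max_separator(s):
--     res = []
--     for c in set(s):
--         s1 = s[:]
--         while s1.count(c) > 1:
--             start = s1.find(c)
--             s1 = s1[start + 1:]
--             len_sub = s1.find(c) + 2
--             res.append((len_sub, c))
--     if res:
--         res.sort(key=lambda t: (-t[0], t[1]))
--         max_len = res[0][0]
--         return [t[1] for t in res if t[0] == max_len]
--     return []
-- ===== SOURCE B (Python) =====
-- def max_separator(s):
--     last = {}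
--     gaps = []
--     for i, c in enumerate(s):
--         if c in last:
--             gaps.append((i - last[c] + 1, c))
--         last[c] = i
--     if not gaps:
--         return []
--     m = max(g for g, _ in gaps)
--     return sorted(c for g, c in gaps if g == m)
-- ===== Notes on version B (the rewrite author's own statement) =====
-- stated objective: faster
-- what changed: A rescans the string with count/find/slice in a while loop for every distinct character; B makes one pass recording the last index of each character to collect all consecutive-occurrence gaps, then takes the max and sorts only the max-gap characters.
import Mathlib
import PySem

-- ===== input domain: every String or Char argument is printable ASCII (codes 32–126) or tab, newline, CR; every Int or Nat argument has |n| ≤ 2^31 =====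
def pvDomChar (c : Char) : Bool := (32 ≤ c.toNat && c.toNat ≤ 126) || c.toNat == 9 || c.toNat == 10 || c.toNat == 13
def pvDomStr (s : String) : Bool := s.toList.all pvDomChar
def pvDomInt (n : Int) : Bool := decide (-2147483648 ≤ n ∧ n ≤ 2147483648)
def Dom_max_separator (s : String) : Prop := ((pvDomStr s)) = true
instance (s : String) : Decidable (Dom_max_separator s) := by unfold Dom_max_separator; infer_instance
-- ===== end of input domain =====

-- B replaces A's per-character while loop of repeated count/find/slice rescans with a single
-- left-to-right pass recording the last index of each character, then one max and one sort.

-- ===== PORT A =====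
-- single-character facts about Python's s.count(c) / s.find(c); pvMaxsepDec is cited by the
-- termination proof (decreasing_by) of the while-loop port maxsepWhile below.
theorem pvCountCharGo (c : Char) : ∀ (l : List Char) (fuel acc : Nat), l.length ≤ fuel →
    PySem.Chars.count.go [c] fuel l acc = acc + l.count c := by
  intro l
  induction l with
  | nil => intro fuel acc h; cases fuel <;> simp [PySem.Chars.count.go]
  | cons x t ih =>
    intro fuel acc h
    match fuel with
    | 0 => simp at h
    | fuel + 1 =>
      simp only [List.length_cons, Nat.add_le_add_iff_right] at h
      by_cases hx : x = c
      · subst hx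
        have hpre : [x].isPrefixOf (x :: t) = true := by simp [List.isPrefixOf]
        simp only [PySem.Chars.count.go, hpre, if_pos]
        rw [show List.drop [x].length (x :: t) = t from rfl, ih fuel (acc+1) h]
        simp
        omega
      · have hpre : [c].isPrefixOf (x :: t) = false := by
          simp [List.isPrefixOf]; exact fun h => hx h.symm
        simp only [PySem.Chars.count.go, hpre, Bool.false_eq_true, ite_false]
        rw [ih fuel acc h]
        simp [hx]

theorem pvCountChar (c : Char) (l : List Char) : PySem.Chars.count l [c] = l.count c := by
  simp only [PySem.Chars.count, List.isEmpty_cons, Bool.false_eq_true, ite_false]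
  rw [pvCountCharGo c l l.length 0 le_rfl]
  omega

theorem pvFindCharGo (c : Char) : ∀ (l : List Char) (k : Nat),
    PySem.Chars.find.go [c] l k = if c ∈ l then ((k : Int) + l.idxOf c) else -1 := by
  intro l
  induction l with
  | nil => intro k; simp [PySem.Chars.find.go]
  | cons x t ih =>
    intro k
    by_cases hx : x = c
    · subst hx
      have hpre : [x].isPrefixOf (x :: t) = true := by simp [List.isPrefixOf]
      simp [PySem.Chars.find.go, hpre]
    · have hpre : [c].isPrefixOf (x :: t) = false := by
        simp [List.isPrefixOf]; exact fun h => hx h.symm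
      simp only [PySem.Chars.find.go, hpre, Bool.false_eq_true, ite_false]
      rw [ih (k+1)]
      by_cases hm : c ∈ t
      · simp [hm, Ne.symm hx, hx]
        ring
      · simp [hm, hx]
        intro h'; exact absurd h'.symm hx

theorem pvFindChar (c : Char) (l : List Char) :
    PySem.Chars.find l [c] = if c ∈ l then (l.idxOf c : Int) else -1 := by
  simp only [PySem.Chars.find]
  rw [pvFindCharGo c l 0]
  simp

theorem pvMaxsepDec (c : Char) (s1 : List Char) (h : 1 < PySem.Chars.count s1 [c]) :
    (PySem.List.slice s1 (some (PySem.Chars.find s1 [c] + 1)) none).length < s1.length := by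
  rw [pvCountChar] at h
  have hm : c ∈ s1 := List.count_pos_iff.1 (by omega)
  rw [pvFindChar, if_pos hm]
  rw [PySem.List.slice_from s1 (by positivity)]
  have hlt : s1.idxOf c < s1.length := List.idxOf_lt_length_of_mem hm
  simp [List.length_drop]
  omega

-- while s1.count(c) > 1: start = s1.find(c); s1 = s1[start+1:]; res.append((s1.find(c)+2, c))
def maxsepWhile (c : Char) (s1 : List Char) (res : List (Int × Char)) : List (Int × Char) :=
  if h : 1 < PySem.Chars.count s1 [c] then
    let start := PySem.Chars.find s1 [c]
    let s1' := PySem.List.slice s1 (some (start + 1)) none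
    let len_sub := PySem.Chars.find s1' [c] + 2
    maxsepWhile c s1' (res ++ [(len_sub, c)])
  else res
termination_by s1.length
decreasing_by exact pvMaxsepDec c s1 h

-- for c in set(s): run the while loop; then sort by (-len, c) and keep the max-length entries.
-- (The hash order of set(s) does not affect the value: this file proves it equals the
-- set-order-free B.)
def max_separator (s : String) : List String :=
  let res := (PySem.Set.ofList s.toList).foldl (fun res c => maxsepWhile c s.toList res) []
  if res.isEmpty then []
  else
    match PySem.List.sorted2 res (fun t => -t.1) (fun t => t.2) with
    | [] => []
    | t0 :: ts => ((t0 :: ts).filter (fun t => t.1 == t0.1)).map (fun t => String.ofList [t.2])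

-- ===== PORT B =====
-- one pass: last index per char in a dict, emitting (i - last[c] + 1, c) at each repeat;
-- then the max gap and an ascending sort of the max-gap characters.
def max_separator_alt (s : String) : List String :=
  let st := (PySem.List.enumerate s.toList).foldl
    (fun (st : PySem.Dict Char Int × List (Int × Char)) ic =>
      (st.1.insert ic.2 ic.1,
       if st.1.contains ic.2 then st.2 ++ [(ic.1 - st.1.getD ic.2 0 + 1, ic.2)] else st.2))
    (PySem.Dict.empty, [])
  if st.2.isEmpty then []
  else
    match PySem.List.max? (st.2.map (fun g => g.1)) (fun x => x) with
    | none => []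
    | some m =>
      PySem.List.sorted ((st.2.filter (fun g => g.1 == m)).map (fun g => String.ofList [g.2]))
        (fun x => x) false

-- ===== PRECONDITION & SPEC =====
def Spec_max_separator (s : String) (out : List String) : Prop := out = max_separator_alt s
instance (s : String) (out : List String) : Decidable (Spec_max_separator s out) := by unfold Spec_max_separator; infer_instance

-- ===== CLAIM (what is proved, stated in full; the proofs are below) =====
def Claim_equal_max_separator : Prop := ∀ (s : String), Dom_max_separator s → Spec_max_separator s (max_separator s)

-- ===== LEMMAS AND PROOFS =====

-- the common specification: for each occurrence of c followed by another occurrence of c,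
-- the distance to that next occurrence plus one, in left-to-right order.
def gapsSpec (c : Char) : List Char → List (Int × Char)
  | [] => []
  | x :: t =>
    if x = c then (if c ∈ t then ((t.idxOf c : Int) + 2, c) :: gapsSpec c t else [])
    else gapsSpec c t

theorem gapsSpec_count_le_one {c : Char} {l : List Char} (h : l.count c ≤ 1) :
    gapsSpec c l = [] := by
  induction l with
  | nil => rfl
  | cons x t ih =>
    simp only [List.count_cons] at h
    by_cases hx : x = c
    · subst hx
      have hnt : x ∉ t := by
        intro hm; have := List.count_pos_iff.2 hm; simp at h; omega
      simp [gapsSpec, hnt]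
    · simp only [gapsSpec, hx, ite_false]
      exact ih (by simpa [hx] using h)

theorem gapsSpec_not_mem {c : Char} {l : List Char} (h : c ∉ l) : gapsSpec c l = [] :=
  gapsSpec_count_le_one (by simp [List.count_eq_zero.2 h])

theorem gapsSpec_append_not_mem {c : Char} {pre l : List Char} (h : c ∉ pre) :
    gapsSpec c (pre ++ l) = gapsSpec c l := by
  induction pre with
  | nil => rfl
  | cons x t ih =>
    simp only [List.mem_cons, not_or] at h
    simp only [List.cons_append, gapsSpec]
    rw [if_neg (fun hx => h.1 hx.symm)]
    exact ih h.2

theorem gapsSpec_snd {c : Char} {l : List Char} {p : Int × Char} (h : p ∈ gapsSpec c l) :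
    p.2 = c := by
  induction l with
  | nil => simp [gapsSpec] at h
  | cons x t ih =>
    simp only [gapsSpec] at h
    split at h
    · split at h
      · rcases List.mem_cons.1 h with h | h
        · simp [h]
        · exact ih h
      · simp at h
    · exact ih h

theorem not_mem_take_idxOf (c : Char) (l : List Char) : c ∉ l.take (l.idxOf c) := by
  induction l with
  | nil => simp
  | cons x t ih =>
    by_cases hx : x = c
    · simp [hx]
    · simp [hx, List.take_succ_cons]
      exact ⟨fun h => absurd h.symm hx, ih⟩

theorem maxsepWhile_eq_aux (c : Char) : ∀ (n : Nat) (l : List Char), l.length = n →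
    ∀ res, maxsepWhile c l res = res ++ gapsSpec c l := by
  intro n
  induction n using Nat.strong_induction_on with
  | _ n ih =>
    intro l hl res
    rw [maxsepWhile]
    by_cases h : 1 < PySem.Chars.count l [c]
    · rw [dif_pos h]
      have hcnt : 1 < l.count c := by rwa [pvCountChar] at h
      have hm : c ∈ l := List.count_pos_iff.1 (by omega)
      have hk : l.idxOf c < l.length := List.idxOf_lt_length_of_mem hm
      have hfind : PySem.Chars.find l [c] = (l.idxOf c : Int) := by rw [pvFindChar, if_pos hm]
      have hslice : PySem.List.slice l (some ((l.idxOf c : Int) + 1)) = l.drop (l.idxOf c + 1) := by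
        rw [PySem.List.slice_from l (by positivity)]
        norm_num
      have hdecomp : l = l.take (l.idxOf c) ++ c :: l.drop (l.idxOf c + 1) := by
        conv_lhs => rw [← List.take_append_drop (l.idxOf c) l]
        rw [List.drop_eq_getElem_cons hk, List.getElem_idxOf hk]
      have hcdrop : c ∈ l.drop (l.idxOf c + 1) := by
        by_contra hc
        rw [hdecomp, List.count_append, List.count_cons] at hcnt
        have h1 : (l.take (l.idxOf c)).count c = 0 := List.count_eq_zero.2 (not_mem_take_idxOf c l)
        have h2 : (l.drop (l.idxOf c + 1)).count c = 0 := List.count_eq_zero.2 hc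
        simp [h1, h2] at hcnt
      have hfind' : PySem.Chars.find (l.drop (l.idxOf c + 1)) [c] =
          ((l.drop (l.idxOf c + 1)).idxOf c : Int) := by rw [pvFindChar, if_pos hcdrop]
      simp only [hfind, hslice, hfind']
      rw [ih (l.drop (l.idxOf c + 1)).length (by simp [List.length_drop]; omega) _ rfl]
      conv_rhs => rw [hdecomp]
      rw [gapsSpec_append_not_mem (not_mem_take_idxOf c l)]
      simp only [gapsSpec, if_pos hcdrop]
      rw [List.append_assoc]
      norm_num [Int.add_comm]
    · rw [dif_neg h]
      rw [pvCountChar] at h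
      rw [gapsSpec_count_le_one (by omega), List.append_nil]

theorem maxsepWhile_eq (c : Char) (l : List Char) (res : List (Int × Char)) :
    maxsepWhile c l res = res ++ gapsSpec c l :=
  maxsepWhile_eq_aux c l.length l rfl res

theorem bpass_filter (c : Char) : ∀ (l : List Char) (n : Int) (d : PySem.Dict Char Int)
    (acc : List (Int × Char)),
    (((PySem.List.enumerate l n).foldl
      (fun (st : PySem.Dict Char Int × List (Int × Char)) ic =>
        (st.1.insert ic.2 ic.1,
         if st.1.contains ic.2 then st.2 ++ [(ic.1 - st.1.getD ic.2 0 + 1, ic.2)] else st.2))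
      (d, acc)).2).filter (fun p => p.2 == c) =
    acc.filter (fun p => p.2 == c) ++
    (match d.get? c with
     | some j => if c ∈ l then [(n + (l.idxOf c : Int) - j + 1, c)] else []
     | none => []) ++ gapsSpec c l := by
  intro l
  induction l with
  | nil =>
    intro n d acc
    simp only [PySem.List.enumerate, List.foldl_nil, gapsSpec, List.not_mem_nil, ite_false,
      List.append_nil]
    cases d.get? c <;> simp
  | cons x t ih =>
    intro n d acc
    have henum : PySem.List.enumerate (x :: t) n = (n, x) :: PySem.List.enumerate t (n + 1) := rfl
    rw [henum, List.foldl_cons]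
    rw [ih (n + 1) (d.insert x n)
      (if d.contains x then acc ++ [(n - d.getD x 0 + 1, x)] else acc)]
    by_cases hx : x = c
    · subst hx
      rw [PySem.Dict.get?_insert_self]
      have hcont : d.contains x = (d.get? x).isSome := PySem.Dict.contains_eq_isSome_get? d x
      cases hd : d.get? x with
      | none =>
        simp only [hcont, hd, Option.isSome_none, Bool.false_eq_true, ite_false]
        simp only [gapsSpec]
        by_cases hmt : x ∈ t
        · have hg : (n + 1 + (t.idxOf x : Int) - n + 1) = (t.idxOf x : Int) + 2 := by ring
          simp [hmt, hg, List.append_assoc]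
        · simp [hmt, gapsSpec_not_mem hmt]
      | some j =>
        simp only [hcont, hd, Option.isSome_some, ite_true]
        simp only [gapsSpec]
        rw [List.filter_append]
        by_cases hmt : x ∈ t
        · have hg : (n + 1 + (t.idxOf x : Int) - n + 1) = (t.idxOf x : Int) + 2 := by ring
          simp [hmt, hg, PySem.Dict.getD, hd, List.append_assoc]
        · rw [gapsSpec_not_mem hmt]
          simp [hmt, PySem.Dict.getD, hd]
    · have hget : (d.insert x n).get? c = d.get? c := PySem.Dict.get?_insert_of_ne d n (fun h => hx h.symm)
      rw [hget]
      have hfilt : (if d.contains x then acc ++ [(n - d.getD x 0 + 1, x)] else acc).filter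
          (fun p => p.2 == c) = acc.filter (fun p => p.2 == c) := by
        split
        · rw [List.filter_append]
          simp [hx]
        · rfl
      rw [hfilt]
      have hspec : gapsSpec c (x :: t) = gapsSpec c t := by simp [gapsSpec, hx]
      rw [hspec]
      congr 1
      cases hd : d.get? c with
      | none => rfl
      | some j =>
        simp only [List.mem_cons]
        by_cases hmt : c ∈ t
        · simp only [hmt, or_true, ite_true, List.idxOf_cons]
          have : (x == c) = false := by simp [hx]
          simp only [this, cond_false]
          congr 2
          push_cast; ring
        · simp [hmt, Ne.symm hx]

theorem count_gapsSpec_ne {l : List Char} {d c : Char} (hne : d ≠ c) (g : Int) :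
    (gapsSpec d l).count (g, c) = 0 := by
  rw [List.count_eq_zero]
  intro h
  exact hne (gapsSpec_snd h).symm

theorem count_flatMap_gapsSpec (l : List Char) (g : Int) (c : Char) :
    ∀ (dl : List Char), dl.Nodup →
    (dl.flatMap (fun d => gapsSpec d l)).count (g, c) =
      if c ∈ dl then (gapsSpec c l).count (g, c) else 0 := by
  intro dl
  induction dl with
  | nil => simp
  | cons d dt ih =>
    intro hnd
    rw [List.flatMap_cons, List.count_append, ih (List.nodup_cons.1 hnd).2]
    by_cases hdc : d = c
    · subst hdc
      have : d ∉ dt := (List.nodup_cons.1 hnd).1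
      simp [this]
    · rw [count_gapsSpec_ne hdc]
      simp [List.mem_cons, Ne.symm hdc]

theorem perm_res_gaps (l : List Char) :
    ((PySem.Set.ofList l).foldl (fun res c => maxsepWhile c l res) []).Perm
    ((PySem.List.enumerate l 0).foldl
      (fun (st : PySem.Dict Char Int × List (Int × Char)) ic =>
        (st.1.insert ic.2 ic.1,
         if st.1.contains ic.2 then st.2 ++ [(ic.1 - st.1.getD ic.2 0 + 1, ic.2)] else st.2))
      (PySem.Dict.empty, [])).2 := by
  have hA : ((PySem.Set.ofList l).foldl (fun res c => maxsepWhile c l res) []) =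
      (PySem.Set.ofList l).flatMap (fun c => gapsSpec c l) := by
    rw [PySem.List.foldl_congr_mem _ _ (fun res c => res ++ gapsSpec c l) _
      (fun acc x _ => maxsepWhile_eq x l acc)]
    rw [PySem.List.foldl_append_eq_flatMap]
    simp
  rw [hA, List.perm_iff_count]
  rintro ⟨g, c⟩
  rw [count_flatMap_gapsSpec l g c _ (PySem.Set.nodup_ofList l)]
  have hfil := bpass_filter c l 0 PySem.Dict.empty []
  rw [PySem.Dict.get?_empty] at hfil
  conv_rhs =>
    rw [← List.count_filter (p := fun p => p.2 == c) (a := ((g, c) : Int × Char)) (by simp)]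
    rw [hfil]
  simp only [List.nil_append, List.filter_nil]
  by_cases hm : c ∈ l
  · simp [PySem.Set.mem_ofList, hm]
  · simp [PySem.Set.mem_ofList, hm, gapsSpec_not_mem hm]

-- the comparator sorted2 uses for key (-t.1, t.2)

-- the comparator sorted2 uses for the key (-t.1, t.2), and its associated order
def msLt (a b : Int × Char) : Bool :=
  decide (-a.1 < -b.1) || (!decide (-b.1 < -a.1) && decide (a.2 < b.2))

def msR (a b : Int × Char) : Prop := b.1 < a.1 ∨ (a.1 = b.1 ∧ a.2 ≤ b.2)

theorem msLt_false_iff (a b : Int × Char) : msLt b a = false ↔ msR a b := by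
  simp only [msLt, msR, Bool.or_eq_false_iff, Bool.and_eq_false_iff, decide_eq_false_iff_not,
    Bool.not_eq_false', decide_eq_true_eq]
  constructor
  · rintro ⟨h1, h2 | h2⟩
    · exact Or.inl (by omega)
    · rcases Int.lt_or_le b.1 a.1 with h | h
      · exact Or.inl h
      · exact Or.inr ⟨by omega, le_of_not_gt h2⟩
  · rintro (h | ⟨h1, h2⟩)
    · exact ⟨by omega, Or.inl (by omega)⟩
    · exact ⟨by omega, Or.inr (not_lt_of_ge h2)⟩

theorem msLt_true_imp {x y : Int × Char} (h : msLt x y = true) : msR x y := by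
  simp only [msLt, Bool.or_eq_true, Bool.and_eq_true, Bool.not_eq_true', decide_eq_true_eq,
    decide_eq_false_iff_not] at h
  rcases h with h | ⟨h1, h2⟩
  · exact Or.inl (by omega)
  · rcases Int.lt_or_le y.1 x.1 with hlt | hle
    · exact Or.inl hlt
    · exact Or.inr ⟨by omega, le_of_lt h2⟩

theorem msLt_trans_R {x y z : Int × Char} (hxy : msLt x y = true) (hyz : msR y z) : msR x z := by
  simp only [msLt, Bool.or_eq_true, Bool.and_eq_true, Bool.not_eq_true', decide_eq_true_eq,
    decide_eq_false_iff_not] at hxy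
  rcases hyz with h | ⟨h1, h2⟩
  · rcases hxy with hx | ⟨hx1, _⟩
    · exact Or.inl (by omega)
    · rcases Int.lt_or_le z.1 x.1 with hlt | hle
      · exact Or.inl hlt
      · exact Or.inl (by omega)
  · rcases hxy with hx | ⟨hx1, hx2⟩
    · exact Or.inl (by omega)
    · rcases Int.lt_or_le z.1 x.1 with hlt | hle
      · exact Or.inl hlt
      · exact Or.inr ⟨by omega, le_of_lt (lt_of_lt_of_le hx2 h2)⟩

theorem insertBy_msR (x : Int × Char) : ∀ (ys : List (Int × Char)), ys.Pairwise msR →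
    (PySem.List.insertBy msLt x ys).Pairwise msR := by
  intro ys
  induction ys with
  | nil => intro _; simp [PySem.List.insertBy]
  | cons y ys ih =>
    intro hp
    rcases List.pairwise_cons.1 hp with ⟨hy, hys⟩
    show (if msLt x y = true then x :: y :: ys else y :: PySem.List.insertBy msLt x ys).Pairwise msR
    split
    · rename_i hlt
      refine List.pairwise_cons.2 ⟨?_, hp⟩
      intro z hz
      rcases List.mem_cons.1 hz with rfl | hz
      · exact msLt_true_imp hlt
      · exact msLt_trans_R hlt (hy z hz)
    · rename_i hnlt
      refine List.pairwise_cons.2 ⟨?_, ih hys⟩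
      intro z hz
      rcases (PySem.List.insertBy_mem_iff msLt x z ys).1 hz with rfl | hz
      · exact (msLt_false_iff y z).1 (Bool.eq_false_iff.2 hnlt)
      · exact hy z hz

theorem foldl_insertBy_msR (xs : List (Int × Char)) : ∀ (acc : List (Int × Char)),
    acc.Pairwise msR → (xs.foldl (fun acc x => PySem.List.insertBy msLt x acc) acc).Pairwise msR := by
  induction xs with
  | nil => intro acc h; simpa
  | cons x xs ih =>
    intro acc h
    rw [List.foldl_cons]
    exact ih _ (insertBy_msR x acc h)

theorem sorted2_pairwise_spec (xs : List (Int × Char)) :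
    (PySem.List.sorted2 xs (fun t => -t.1) (fun t => t.2)).Pairwise
      (fun a b => b.1 < a.1 ∨ (a.1 = b.1 ∧ a.2 ≤ b.2)) := by
  have : PySem.List.sorted2 xs (fun t => -t.1) (fun t => t.2) =
      xs.foldl (fun acc x => PySem.List.insertBy msLt x acc) [] := rfl
  rw [this]
  exact foldl_insertBy_msR xs [] (by simp)

theorem singleton_str_le {a b : Char} (h : a ≤ b) : String.ofList [a] ≤ String.ofList [b] := by
  rw [String.le_iff_toList_le]
  simp only [String.toList_ofList]
  rcases lt_or_eq_of_le h with h | h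
  · exact le_of_lt (List.Lex.rel h)
  · simp [h]

theorem max_separator_main (s : String) : max_separator s = max_separator_alt s := by
  have hperm := perm_res_gaps s.toList
  set resA := (PySem.Set.ofList s.toList).foldl (fun res c => maxsepWhile c s.toList res) []
    with hresA
  set fold := (PySem.List.enumerate s.toList 0).foldl
    (fun (st : PySem.Dict Char Int × List (Int × Char)) ic =>
      (st.1.insert ic.2 ic.1,
       if st.1.contains ic.2 then st.2 ++ [(ic.1 - st.1.getD ic.2 0 + 1, ic.2)] else st.2))
    (PySem.Dict.empty, ([] : List (Int × Char))) with hfold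
  by_cases hres : resA = []
  · have hgb : fold.2 = [] := (hres ▸ hperm).symm.eq_nil
    simp only [max_separator, max_separator_alt, ← hresA, ← hfold, hres, hgb]
    rfl
  · have hgb : fold.2 ≠ [] := fun h => hres ((h ▸ hperm).eq_nil)
    have hps : (PySem.List.sorted2 resA (fun t => -t.1) (fun t => t.2)).Perm resA :=
      PySem.List.sorted2_perm resA _ _ false
    have hsne : PySem.List.sorted2 resA (fun t => -t.1) (fun t => t.2) ≠ [] := by
      intro h
      exact hres (h ▸ hps).symm.eq_nil
    obtain ⟨t0, ts, hcons⟩ : ∃ t0 ts, PySem.List.sorted2 resA (fun t => -t.1) (fun t => t.2)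
        = t0 :: ts := by
      cases h : PySem.List.sorted2 resA (fun t => -t.1) (fun t => t.2) with
      | nil => exact absurd h hsne
      | cons a b => exact ⟨a, b, rfl⟩
    obtain ⟨m, hmax⟩ : ∃ m, PySem.List.max? (fold.2.map (fun g => g.1)) (fun x => x) = some m := by
      cases h : PySem.List.max? (fold.2.map (fun g => g.1)) (fun x => x) with
      | none =>
        rw [PySem.List.max?_eq_none_iff, List.map_eq_nil_iff] at h
        exact absurd h hgb
      | some m => exact ⟨m, rfl⟩
    have hpair := sorted2_pairwise_spec resA
    rw [hcons] at hpair hps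
    have ht0A : t0 ∈ resA := hps.subset (List.mem_cons_self)
    have ht0B : t0 ∈ fold.2 := hperm.subset ht0A
    have hle : t0.1 ≤ m := by
      have := PySem.List.max?_isMax hmax t0.1 (List.mem_map.2 ⟨t0, ht0B, rfl⟩)
      simpa using this
    have hge : m ≤ t0.1 := by
      obtain ⟨g, hgB, hg1⟩ := List.mem_map.1 (PySem.List.max?_mem hmax)
      have hgs : g ∈ t0 :: ts := hps.symm.subset (hperm.symm.subset hgB)
      rcases List.mem_cons.1 hgs with rfl | hgts
      · omega
      · rcases (List.pairwise_cons.1 hpair).1 g hgts with h | ⟨h, _⟩ <;> omega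
    have ht0m : t0.1 = m := le_antisymm hle hge
    -- reduce both sides
    have hresE : resA.isEmpty = false := by simp [List.isEmpty_eq_false_iff, hres]
    have hgbE : fold.2.isEmpty = false := by simp [List.isEmpty_eq_false_iff, hgb]
    simp only [max_separator, max_separator_alt, ← hresA, ← hfold, hresE, hgbE,
      Bool.false_eq_true, ite_false, hcons, hmax]
    -- goal: filter/map = sorted(filter/map)
    apply PySem.List.eq_of_perm_of_pairwise_le_of_injective (key := fun x => x)
      Function.injective_id
    · -- perm
      have h1 : ((t0 :: ts).filter (fun t => t.1 == t0.1)).Perm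
          (fold.2.filter (fun t => t.1 == t0.1)) := by
        exact (hps.trans hperm).filter _
      have h2 : (fold.2.filter (fun t => t.1 == t0.1)) = fold.2.filter (fun g => g.1 == m) := by
        rw [ht0m]
      refine ((h1.map _).trans ?_)
      rw [h2]
      exact (PySem.List.sorted_perm _ _ _).symm
    · -- pairwise on A's side
      rw [List.pairwise_map]
      have hfp : ((t0 :: ts).filter (fun t => t.1 == t0.1)).Pairwise
          (fun a b => b.1 < a.1 ∨ (a.1 = b.1 ∧ a.2 ≤ b.2)) := hpair.filter _
      refine hfp.imp_of_mem ?_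
      intro a b ha hb hR
      have ha1 : a.1 = t0.1 := by simpa using (List.mem_filter.1 ha).2
      have hb1 : b.1 = t0.1 := by simpa using (List.mem_filter.1 hb).2
      rcases hR with h | ⟨_, h⟩
      · omega
      · exact singleton_str_le h
    · -- pairwise on B's side
      exact PySem.List.sorted_pairwise _ _

-- ===== VERDICT (by name: the statement is the Claim_ definition above) =====
theorem max_separator_spec : Claim_equal_max_separator := by
  intro s _
  exact max_separator_main s
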